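-- pv_equiv track=rewrite | github.com/Christian-OSS-code/python-class | STUDENT GRADE BUILDER  PYTHON/hardestsubject.py | get_numberoffailures
-- ===== SOURCE A (Python) =====
-- def get_numberoffailures(student_records:dict):
--
--     subject_score_list = list(map(list, zip(*student_records.values())))
--
--
--     failed_list = []
--     for count, scores in enumerate(subject_score_list):
--         failed_list.append([counter + 1 for counter, score in enumerate(scores) if score < 50])
--
--     number_of_failed_list = []
--     for number in failed_list:
--        number_of_failed_list.append(len(number))
--
--     return number_of_failed_list
-- ===== SOURCE B (Python) =====
-- def get_numberoffailures(student_records: dict):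
--     if not student_records:
--         return []
--     score_lists = list(student_records.values())
--     num_subjects = min(len(scores) for scores in score_lists)
--     return [sum(1 for scores in score_lists if scores[i] < 50)
--             for i in range(num_subjects)]
-- ===== Notes on version B (the rewrite author's own statement) =====
-- stated objective: simpler
-- what changed: B drops the zip-transpose and the intermediate list of failing student numbers: it computes the number of subjects as the minimum score-list length (matching zip's truncation) and counts failing scores directly per subject index.
import Mathlib
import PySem

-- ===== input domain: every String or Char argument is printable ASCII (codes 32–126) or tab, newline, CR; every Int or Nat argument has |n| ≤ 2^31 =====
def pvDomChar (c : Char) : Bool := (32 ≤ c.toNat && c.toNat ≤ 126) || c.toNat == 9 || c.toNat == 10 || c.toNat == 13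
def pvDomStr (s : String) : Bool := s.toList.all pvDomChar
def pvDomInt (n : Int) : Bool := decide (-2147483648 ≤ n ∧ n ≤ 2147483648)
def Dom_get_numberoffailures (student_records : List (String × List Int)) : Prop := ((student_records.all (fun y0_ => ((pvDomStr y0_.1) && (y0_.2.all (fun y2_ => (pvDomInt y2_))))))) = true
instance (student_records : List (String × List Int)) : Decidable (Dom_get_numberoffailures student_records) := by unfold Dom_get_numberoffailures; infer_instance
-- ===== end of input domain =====

-- B replaces A's zip-transpose + per-subject failing-student lists by a direct per-subject count
-- over min-length-truncated indices (objective: simpler).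

-- ===== PORT A =====
-- zip(*rows) with Python's shortest-list truncation; fuel = first row's length bounds the output
def pyZipGo : Nat → List (List Int) → List (List Int)
  | 0, _ => []
  | fuel + 1, rows =>
    if rows.all (fun r => !r.isEmpty) then
      rows.map (fun r => r.headI) :: pyZipGo fuel (rows.map List.tail)
    else []

def pyZipT (rows : List (List Int)) : List (List Int) :=
  match rows with
  | [] => []
  | r :: rs => pyZipGo r.length (r :: rs)

def get_numberoffailures (student_records : List (String × List Int)) : List Int :=
  let subject_score_list := pyZipT (student_records.map Prod.snd)
  let failed_list := subject_score_list.map (fun scores =>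
    ((PySem.List.enumerate scores 0).filter (fun p => p.2 < 50)).map (fun p => p.1 + 1))
  failed_list.map (fun number => (number.length : Int))

-- ===== PORT B =====
def get_numberoffailures_alt (student_records : List (String × List Int)) : List Int :=
  match student_records with
  | [] => []
  | p :: ps =>
    let score_lists := (p :: ps).map Prod.snd
    let num_subjects := (ps.map (fun q => q.2.length)).foldl min p.2.length
    (List.range num_subjects).map (fun i =>
      score_lists.foldl (fun acc scores => if scores.getD i 0 < 50 then acc + 1 else acc) (0 : Int))

-- ===== PRECONDITION & SPEC =====
def Spec_get_numberoffailures (student_records : List (String × List Int)) (out : List Int) : Prop := out = get_numberoffailures_alt student_records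
instance (student_records : List (String × List Int)) (out : List Int) : Decidable (Spec_get_numberoffailures student_records out) := by unfold Spec_get_numberoffailures; infer_instance

-- ===== CLAIM (what is proved, stated in full; the proofs are below) =====
def Claim_equal_get_numberoffailures : Prop := ∀ (student_records : List (String × List Int)), Dom_get_numberoffailures student_records → Spec_get_numberoffailures student_records (get_numberoffailures student_records)

-- ===== LEMMAS AND PROOFS =====

-- min over lengths, as B's fold computes it on a nonempty list
def minLen : List (List Int) → Nat
  | [] => 0
  | r :: rs => (rs.map List.length).foldl min r.length

theorem foldl_min_le (l : List Nat) (a : Nat) : l.foldl min a ≤ a := by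
  induction l generalizing a with
  | nil => simp
  | cons x xs ih => exact le_trans (ih (min a x)) (by omega)

theorem foldl_min_zero_of_mem (l : List Nat) (a : Nat) (h : 0 ∈ l) : l.foldl min a = 0 := by
  induction l generalizing a with
  | nil => simp at h
  | cons x xs ih =>
    simp only [List.foldl_cons]
    rcases List.mem_cons.1 h with h0 | h0
    · subst h0; exact Nat.le_zero.1 (by simpa using foldl_min_le xs (min a 0))
    · exact ih _ h0

theorem foldl_min_sub_one (l : List Nat) (a : Nat)
    (hl : ∀ x ∈ l, 1 ≤ x) (ha : 1 ≤ a) :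
    (l.map (fun x => x - 1)).foldl min (a - 1) = l.foldl min a - 1 := by
  induction l generalizing a with
  | nil => simp
  | cons x xs ih =>
    simp only [List.map_cons, List.foldl_cons]
    have hx := hl x (by simp)
    have : min (a - 1) (x - 1) = min a x - 1 := by omega
    rw [this, ih _ (fun y hy => hl y (by simp [hy])) (by omega)]

theorem minLen_zero_of_empty_mem (rows : List (List Int)) (h : [] ∈ rows) :
    minLen rows = 0 := by
  cases rows with
  | nil => simp at h
  | cons r rs =>
    rcases List.mem_cons.1 h with h0 | h0
    · subst h0
      exact Nat.le_zero.1 (by simpa using foldl_min_le (rs.map List.length) 0)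
    · exact foldl_min_zero_of_mem _ _ (by
        exact List.mem_map.2 ⟨[], h0, rfl⟩)

theorem minLen_tail (rows : List (List Int)) (hne : rows ≠ [])
    (hall : ∀ r ∈ rows, r ≠ []) :
    minLen (rows.map List.tail) = minLen rows - 1 := by
  cases rows with
  | nil => exact absurd rfl hne
  | cons r rs =>
    have h1 : ∀ x ∈ rs.map List.length, 1 ≤ x := by
      intro x hx
      rcases List.mem_map.1 hx with ⟨s, hs, rfl⟩
      have := hall s (by simp [hs])
      exact List.length_pos_iff.2 this
    have hr : 1 ≤ r.length := List.length_pos_iff.2 (hall r (by simp))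
    simp only [minLen, List.map_cons, List.map_map]
    have : (rs.map (List.length ∘ List.tail)) = (rs.map List.length).map (fun x => x - 1) := by
      simp [List.map_map, Function.comp_def, List.length_tail]
    rw [this, show (r.tail).length = r.length - 1 from List.length_tail, foldl_min_sub_one _ _ h1 hr]

theorem pyZipGo_spec (fuel : Nat) : ∀ rows : List (List Int), rows ≠ [] →
    minLen rows ≤ fuel →
    pyZipGo fuel rows = (List.range (minLen rows)).map (fun i => rows.map (fun r => r.getD i 0)) := by
  induction fuel with
  | zero =>
    intro rows _ hle
    have : minLen rows = 0 := Nat.le_zero.1 hle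
    simp [pyZipGo, this]
  | succ n ih =>
    intro rows hne hle
    by_cases hall : ∀ r ∈ rows, r ≠ []
    · have hcond : rows.all (fun r => !r.isEmpty) = true := by
        simp only [List.all_eq_true, Bool.not_eq_true', List.isEmpty_eq_false_iff]
        exact hall
      have hm : 1 ≤ minLen rows := by
        cases rows with
        | nil => exact absurd rfl hne
        | cons r rs =>
          by_contra h
          have h0 : minLen (r :: rs) = 0 := by omega
          have hr : 1 ≤ r.length := List.length_pos_iff.2 (hall r (by simp))
          have key : ∀ l : List Nat, (∀ x ∈ l, 1 ≤ x) → ∀ a, 1 ≤ a → 1 ≤ l.foldl min a := by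
            intro l
            induction l with
            | nil => intro _ a ha; simpa using ha
            | cons x xs ihx =>
              intro hx a ha
              have := hx x (by simp)
              exact ihx (fun y hy => hx y (by simp [hy])) (min a x) (by omega)
          have h1 : ∀ x ∈ rs.map List.length, 1 ≤ x := by
            intro x hx
            rcases List.mem_map.1 hx with ⟨s, hs, rfl⟩
            exact List.length_pos_iff.2 (hall s (by simp [hs]))
          have := key (rs.map List.length) h1 r.length hr
          simp only [minLen] at h0
          omega
      have htail_ne : rows.map List.tail ≠ [] := by
        cases rows with
        | nil => exact absurd rfl hne
        | cons r rs => simp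
      have hmt : minLen (rows.map List.tail) = minLen rows - 1 := minLen_tail rows hne hall
      obtain ⟨k, hk⟩ : ∃ k, minLen rows = k + 1 := ⟨minLen rows - 1, by omega⟩
      have hmt' : minLen (rows.map List.tail) = k := by omega
      simp only [pyZipGo, hcond, if_pos]
      rw [ih (rows.map List.tail) htail_ne (by omega), hmt', hk, List.range_succ_eq_map]
      simp only [List.map_cons]
      congr 1
      · apply List.map_congr_left
        intro r hr
        cases r with
        | nil => exact absurd rfl (hall [] hr)
        | cons x xs => simp [List.headI]
      · rw [List.map_map]
        apply List.map_congr_left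
        intro i _
        simp only [Function.comp_def, List.map_map]
        apply List.map_congr_left
        intro r hr
        cases r with
        | nil => exact absurd rfl (hall [] hr)
        | cons x xs => simp
    · push Not at hall
      rcases hall with ⟨r, hr, hrnil⟩
      subst hrnil
      have hcond : rows.all (fun r => !r.isEmpty) = false := by
        simp only [List.all_eq_false]
        exact ⟨[], hr, by simp⟩
      have hm0 : minLen rows = 0 := minLen_zero_of_empty_mem rows hr
      simp [pyZipGo, hcond, hm0]

-- A's per-subject list of failing student numbers has length = count of failing scores
theorem enum_filter_len (scores : List Int) (s : Int) :
    ((((PySem.List.enumerate scores s).filter (fun p => p.2 < 50)).map (fun p => p.1 + 1)).length)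
      = scores.countP (fun x => x < 50) := by
  induction scores generalizing s with
  | nil => simp [PySem.List.enumerate_nil]
  | cons x xs ih =>
    rw [PySem.List.enumerate_cons]
    simp only [List.filter_cons, List.countP_cons]
    by_cases hx : x < 50 <;> simp [hx, ih (s + 1)]

-- ===== VERDICT (by name: the statement is the Claim_ definition above) =====
theorem get_numberoffailures_spec : Claim_equal_get_numberoffailures := by
  intro records _
  show get_numberoffailures records = get_numberoffailures_alt records
  cases records with
  | nil => rfl
  | cons p ps =>
    unfold get_numberoffailures get_numberoffailures_alt
    simp only [List.map_cons]
    have hne : (p.2 :: ps.map Prod.snd) ≠ [] := by simp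
    have hfuel : minLen (p.2 :: ps.map Prod.snd) ≤ p.2.length := by
      simp only [minLen, List.map_map]
      exact foldl_min_le _ _
    have hm : (ps.map (fun q => q.2.length)).foldl min p.2.length
        = minLen (p.2 :: ps.map Prod.snd) := by
      simp [minLen, List.map_map, Function.comp_def]
    simp only [pyZipT]
    rw [pyZipGo_spec p.2.length _ hne hfuel, hm]
    rw [List.map_map, List.map_map]
    apply List.map_congr_left
    intro i _
    simp only [Function.comp_def]
    have hfold := PySem.List.foldl_count_if
      (fun scores : List Int => decide (scores.getD i 0 < 50)) (p.2 :: ps.map Prod.snd) 0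
    simp only [decide_eq_true_eq] at hfold
    rw [hfold, enum_filter_len _ 0, List.countP_map]
    simp [Function.comp_def]
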